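-- pv_equiv track=rewrite | github.com/jordibc/geometric-algebra | geometric_algebra.py | next_element
-- ===== SOURCE A (Python) =====
-- def is_last(e, n):
--     """Is e the last of the blades with that number of vectors?"""
--     # An example of last blade for n=4, with 2 vectors: [2, 3]
--     return e == list(range(n - len(e), n))
--
-- def next_element(e, n):
--     """Return the multivector (in dim n) base element next to e."""
--     if is_last(e, n):
--         return list(range(len(e)+1)) if len(e) < n else None
--
--     e_next = e.copy()  # new element (we will modify it in-place)
--
--     pos = next(len(e_next)-1-i for i in range(len(e_next))
--                if e_next[-1 - i] != n - 1 - i)  # maximum possible at that pos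
--
--     e_next[pos] += 1  # increment at that position
--     for i in range(pos + 1, len(e_next)):
--         e_next[i] = e_next[i-1] + 1  # and make the following ones follow up
--
--     return e_next
-- ===== SOURCE B (Python) =====
-- def _succ_rev(r, n):
--     """Next same-size element, working on the reversed blade r; None if r is the last one.
--     If the first entry is not yet maximal (n-1), bump it; otherwise recurse on the rest
--     within the shrunken universe n-1 and let the bumped entries follow up."""
--     if not r:
--         return None
--     last, init = r[0], r[1:]
--     if last != n - 1:
--         return [last + 1] + init
--     s = _succ_rev(init, n - 1)
--     return None if s is None else [s[0] + 1] + s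
--
-- def next_element(e, n):
--     """Return the multivector (in dim n) base element next to e."""
--     s = _succ_rev(e[::-1], n)
--     if s is not None:
--         return s[::-1]
--     k = len(e)
--     return list(range(k + 1)) if k < n else None
-- ===== Notes on version B (the rewrite author's own statement) =====
-- stated objective: alternative
-- what changed: A scans from the right for the first non-maximal position with an index generator and then fixes up the tail in-place with an index loop; B is a structural recursion on the reversed blade that peels off maximal trailing indices while shrinking the universe bound (n becomes n-1), rebuilding the successor on the way back, with no index arithmetic and no mutation.
import Mathlib
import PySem

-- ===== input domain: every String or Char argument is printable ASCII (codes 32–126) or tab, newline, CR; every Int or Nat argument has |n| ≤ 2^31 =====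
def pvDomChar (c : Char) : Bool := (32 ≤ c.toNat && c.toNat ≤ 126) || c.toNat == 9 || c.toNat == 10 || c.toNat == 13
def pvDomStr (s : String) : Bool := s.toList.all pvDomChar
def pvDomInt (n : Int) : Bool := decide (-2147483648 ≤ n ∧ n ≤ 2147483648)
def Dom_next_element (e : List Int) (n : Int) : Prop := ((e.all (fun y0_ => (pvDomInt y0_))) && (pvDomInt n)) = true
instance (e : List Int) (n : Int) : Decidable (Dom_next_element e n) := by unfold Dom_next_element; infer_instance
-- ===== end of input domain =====

-- B replaces A's rightmost-mismatch scan plus in-place fix-up loop by a structural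
-- recursion on the reversed blade with a shrinking universe bound (objective: alternative).

-- ===== PORT A =====
def is_last (e : List Int) (n : Int) : Bool :=
  e == PySem.List.pyRange (n - e.length) n 1

-- pos = next(len(e)-1-i for i in range(len(e)) if e[-1-i] != n-1-i);
-- when is_last e n is false some index always differs, so the `none` default is unreachable.
def findPos (e : List Int) (n : Int) : Nat :=
  match (List.range e.length).find?
      (fun (i : Nat) => PySem.List.pyGet? e (-1 - (i : Int)) != some (n - 1 - (i : Int))) with
  | some i => e.length - 1 - i
  | none => 0

def next_element (e : List Int) (n : Int) : Option (List Int) :=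
  if is_last e n then
    if (e.length : Int) < n then some (PySem.List.pyRange 0 ((e.length : Int) + 1) 1) else none
  else
    let pos := findPos e n
    -- e_next[pos] += 1  (pos is a non-negative in-range index, so set/getD are exact)
    let e1 := e.set pos (e.getD pos 0 + 1)
    -- for i in range(pos+1, len(e_next)): e_next[i] = e_next[i-1] + 1  (all indices in range)
    some ((List.range' (pos + 1) (e.length - (pos + 1))).foldl
      (fun acc i => acc.set i (acc.getD (i - 1) 0 + 1)) e1)

-- ===== PORT B =====
-- _succ_rev from Source B: next same-size element on the reversed blade, none if last
def succR : List Int → Int → Option (List Int)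
  | [], _ => none
  | last :: init, n =>
    if last ≠ n - 1 then some ((last + 1) :: init)
    else
      match succR init (n - 1) with
      | none => none
      | some [] => none   -- unreachable: succR never returns some []
      | some (s0 :: srest) => some ((s0 + 1) :: s0 :: srest)

def next_element_alt (e : List Int) (n : Int) : Option (List Int) :=
  match succR e.reverse n with
  | some s => some s.reverse
  | none =>
    if (e.length : Int) < n then some (PySem.List.pyRange 0 ((e.length : Int) + 1) 1) else none

-- ===== PRECONDITION & SPEC =====
-- (no Pre_: both programs are total and agree on every input)
def Spec_next_element (e : List Int) (n : Int) (out : Option (List Int)) : Prop := out = next_element_alt e n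
instance (e : List Int) (n : Int) (out : Option (List Int)) : Decidable (Spec_next_element e n out) := by unfold Spec_next_element; infer_instance

-- ===== CLAIM (what is proved, stated in full; the proofs are below) =====
def Claim_equal_next_element : Prop := ∀ (e : List Int) (n : Int), Dom_next_element e n → Spec_next_element e n (next_element e n)

-- ===== LEMMAS AND PROOFS =====

-- [v, v+1, ..., v+k-1]
def ramp (v : Int) : Nat → List Int
  | 0 => []
  | k + 1 => v :: ramp (v + 1) k

-- length of the maximal prefix of r matching [n-1, n-2, ...]
def matchLen : List Int → Int → Nat
  | [], _ => 0
  | x :: rest, n => if x = n - 1 then matchLen rest (n - 1) + 1 else 0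

lemma ramp_snoc (v : Int) (k : Nat) : ramp v (k + 1) = ramp v k ++ [v + k] := by
  induction k generalizing v with
  | zero => simp [ramp]
  | succ k ih =>
    show v :: ramp (v + 1) (k + 1) = (v :: ramp (v + 1) k) ++ [v + (k + 1 : Nat)]
    rw [ih]
    simp
    ring

lemma pyRange_eq_ramp (m : Nat) (a : Int) : PySem.List.pyRange a (a + m) 1 = ramp a m := by
  induction m generalizing a with
  | zero => simp [PySem.List.pyRange_one_eq_nil, ramp]
  | succ m ih =>
    rw [PySem.List.pyRange_one_cons (by push_cast; omega)]
    have h2 : a + ((m : Nat) + 1 : Nat) = (a + 1) + (m : Nat) := by push_cast; ring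
    rw [ramp, h2, ih]

lemma matchLen_le (r : List Int) (n : Int) : matchLen r n ≤ r.length := by
  induction r generalizing n with
  | nil => simp [matchLen]
  | cons x rest ih =>
    simp only [matchLen]
    split_ifs
    · simpa using ih (n - 1)
    · simp

lemma matchLen_get (r : List Int) (n : Int) (j : Nat) (hj : j < matchLen r n) :
    r.getD j 0 = n - 1 - j := by
  induction r generalizing n j with
  | nil => simp [matchLen] at hj
  | cons x rest ih =>
    simp only [matchLen] at hj
    split_ifs at hj with hx
    · cases j with
      | zero => simpa using hx
      | succ j =>
        have h := ih (n - 1) j (by omega)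
        rw [List.getD_cons_succ, h]
        push_cast
        ring
    · omega

lemma matchLen_ne (r : List Int) (n : Int) (h : matchLen r n < r.length) :
    r.getD (matchLen r n) 0 ≠ n - 1 - (matchLen r n : Int) := by
  induction r generalizing n with
  | nil => simp at h
  | cons x rest ih =>
    simp only [matchLen] at h ⊢
    split_ifs at h ⊢ with hx
    · have h' : matchLen rest (n - 1) < rest.length := by
        simp only [List.length_cons] at h; omega
      have hne := ih (n - 1) h'
      rw [List.getD_cons_succ]
      intro hcon
      apply hne
      rw [hcon]
      push_cast
      ring
    · rw [List.getD_cons_zero]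
      push_cast
      intro hcon
      exact hx (by omega)

lemma append_singleton_inj (l1 l2 : List Int) (a b : Int) :
    l1 ++ [a] = l2 ++ [b] ↔ l1 = l2 ∧ a = b := by
  constructor
  · intro h
    obtain ⟨h1, h2⟩ := List.append_inj' h rfl
    exact ⟨h1, by simpa using h2⟩
  · rintro ⟨rfl, rfl⟩; rfl

lemma matchLen_eq_length_iff (r : List Int) (n : Int) :
    matchLen r n = r.length ↔ r.reverse = ramp (n - r.length) r.length := by
  induction r generalizing n with
  | nil => simp [matchLen, ramp]
  | cons x rest ih =>
    simp only [matchLen, List.reverse_cons, List.length_cons]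
    have hv : ramp (n - ((rest.length + 1 : Nat) : Int)) (rest.length + 1)
        = ramp (n - 1 - rest.length) rest.length ++ [n - 1] := by
      rw [show (n - ((rest.length + 1 : Nat) : Int)) = n - 1 - rest.length by push_cast; ring,
        ramp_snoc]
      rw [show n - 1 - (rest.length : Int) + rest.length = n - 1 by ring]
    rw [hv, append_singleton_inj]
    split_ifs with hx
    · constructor
      · intro h
        refine ⟨?_, hx⟩
        have := (ih (n - 1)).mp (by omega)
        rwa [show n - 1 - (rest.length : Int) = n - 1 - rest.length by ring] at this
      · rintro ⟨h, -⟩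
        have := (ih (n - 1)).mpr h
        omega
    · constructor
      · intro h; exact h.elim
      · rintro ⟨-, h2⟩; exact absurd h2 hx

lemma succR_spec : ∀ (r : List Int) (n : Int),
    succR r n = if matchLen r n = r.length then none
      else some ((ramp (r.getD (matchLen r n) 0 + 1) (matchLen r n + 1)).reverse
                  ++ r.drop (matchLen r n + 1)) := by
  intro r
  induction r with
  | nil => intro n; simp [succR, matchLen]
  | cons x rest ih =>
    intro n
    by_cases hx : x = n - 1
    · subst hx
      have hs := ih (n - 1)
      have hm : matchLen ((n - 1) :: rest) n = matchLen rest (n - 1) + 1 := by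
        simp [matchLen]
      by_cases hk : matchLen rest (n - 1) = rest.length
      · rw [if_pos hk] at hs
        simp only [succR]
        rw [if_neg (fun h => h rfl), hs]
        rw [if_pos (by simp [hm, hk])]
      · rw [if_neg hk] at hs
        have hkle : matchLen rest (n - 1) ≤ rest.length := matchLen_le rest (n - 1)
        set k' := matchLen rest (n - 1) with hk'
        set v := rest.getD k' 0 + 1 with hv
        have hs' : succR rest (n - 1)
            = some ((v + k') :: ((ramp v k').reverse ++ rest.drop (k' + 1))) := by
          rw [hs, ramp_snoc]
          simp
        simp only [succR]
        rw [if_neg (fun h => h rfl), hs']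
        rw [if_neg (by simp only [hm, List.length_cons]; omega)]
        simp only [hm, List.getD_cons_succ, List.drop_succ_cons, ← hv]
        rw [ramp_snoc v (k' + 1)]
        simp only [List.reverse_append, List.reverse_cons, List.reverse_nil,
          List.nil_append, List.cons_append]
        rw [show v + ((k' : Nat) + 1 : Nat) = v + k' + 1 by push_cast; ring]
        rw [ramp_snoc v k']
        simp
    · simp only [succR, if_pos hx, matchLen, if_neg hx]
      simp [ramp]

lemma take_set_succ (l : List Int) (j : Nat) (v : Int) (h : j < l.length) :
    (l.set j v).take (j + 1) = l.take j ++ [v] := by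
  induction l generalizing j with
  | nil => simp at h
  | cons a l ih =>
    cases j with
    | zero => simp
    | succ j =>
      simp only [List.set_cons_succ, List.take_succ_cons, List.cons_append]
      rw [ih j (by simpa using h)]

lemma getD_set_self (l : List Int) (j : Nat) (v : Int) (h : j < l.length) :
    (l.set j v).getD j 0 = v := by
  rw [List.getD_eq_getElem _ _ (by simpa using h)]
  simp [List.getElem_set_self]

lemma fold_fill : ∀ (cnt : Nat) (l : List Int) (j : Nat), 1 ≤ j → j + cnt = l.length →
    (List.range' j cnt).foldl (fun acc i => acc.set i (acc.getD (i - 1) 0 + 1)) l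
      = l.take j ++ ramp (l.getD (j - 1) 0 + 1) cnt := by
  intro cnt
  induction cnt with
  | zero =>
    intro l j h1 h2
    simp only [List.range'_zero, List.foldl_nil, ramp, List.append_nil]
    rw [List.take_of_length_le (by omega)]
  | succ cnt ih =>
    intro l j h1 h2
    rw [List.range'_succ, List.foldl_cons]
    have hj : j < l.length := by omega
    rw [ih (l.set j (l.getD (j - 1) 0 + 1)) (j + 1) (by omega) (by simpa using by omega)]
    rw [show j + 1 - 1 = j from rfl, getD_set_self l j _ hj, take_set_succ l j _ hj]
    simp [ramp, List.append_assoc]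

lemma find_range'_eq : ∀ (cnt s k : Nat) (p : Nat → Bool), k < cnt →
    (∀ j, j < k → p (s + j) = false) → p (s + k) = true →
    (List.range' s cnt).find? p = some (s + k) := by
  intro cnt
  induction cnt with
  | zero => intro s k p hk _ _; omega
  | succ cnt ih =>
    intro s k p hk hlt hp
    rw [List.range'_succ]
    cases k with
    | zero =>
      rw [List.find?_cons_of_pos (by simpa using hp)]
      simp
    | succ k =>
      rw [List.find?_cons_of_neg (by simpa using hlt 0 (by omega))]
      have := ih (s + 1) k p (by omega) (fun j hj => by
        rw [show s + 1 + j = s + (j + 1) by omega]; exact hlt (j + 1) (by omega))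
        (by rw [show s + 1 + k = s + (k + 1) by omega]; exact hp)
      rw [this]
      congr 1
      omega

lemma is_last_iff (e : List Int) (n : Int) :
    is_last e n = true ↔ matchLen e.reverse n = e.length := by
  unfold is_last
  rw [beq_iff_eq]
  have hpr : PySem.List.pyRange (n - e.length) n 1 = ramp (n - e.length) e.length := by
    have h := pyRange_eq_ramp e.length (n - e.length)
    rwa [show n - (e.length : Int) + e.length = n by ring] at h
  rw [hpr]
  have h2 := matchLen_eq_length_iff e.reverse n
  rw [List.length_reverse, List.reverse_reverse] at h2
  rw [h2]

-- ===== VERDICT (by name: the statement is the Claim_ definition above) =====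
theorem next_element_spec : Claim_equal_next_element := by
  intro e n _
  unfold Spec_next_element
  have hsp := succR_spec e.reverse n
  have hlen : e.reverse.length = e.length := List.length_reverse
  by_cases hk : matchLen e.reverse n = e.length
  · have hlast : is_last e n = true := (is_last_iff e n).mpr hk
    rw [if_pos (by rw [hlen]; exact hk)] at hsp
    simp only [next_element, next_element_alt, hlast, if_true, hsp]
  · have hkm : matchLen e.reverse n < e.length :=
      lt_of_le_of_ne (hlen ▸ matchLen_le e.reverse n) hk
    set k := matchLen e.reverse n with hkdef
    set pos := e.length - 1 - k with hpos
    have hlast : is_last e n = false := by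
      rw [Bool.eq_false_iff]
      intro hc
      exact hk ((is_last_iff e n).mp hc)
    have hpred : ∀ i, i < e.length →
        ((PySem.List.pyGet? e (-1 - (i : Int)) != some (n - 1 - (i : Int))) = true
          ↔ e.reverse.getD i 0 ≠ n - 1 - (i : Int)) := by
      intro i hi
      have h1 : (-1 - (i : Int)) = -(((i + 1 : Nat) : Int)) := by push_cast; ring
      have h2 : PySem.List.pyGet? e (-1 - (i : Int)) = e[e.length - (i + 1)]? := by
        rw [h1, PySem.List.pyGet?_neg_natCast e (i + 1) (by omega) (by omega)]
      have h3 : e[e.length - (i + 1)]? = some (e.reverse.getD i 0) := by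
        rw [List.getElem?_eq_getElem (by omega)]
        congr 1
        rw [List.getD_eq_getElem _ _ (by rw [hlen]; omega), List.getElem_reverse]
        congr 1
        omega
      simp [h2, h3]
    have hptrue :
        (fun (i : Nat) => PySem.List.pyGet? e (-1 - (i : Int)) != some (n - 1 - (i : Int))) k
          = true := by
      exact (hpred k hkm).mpr (matchLen_ne e.reverse n (by rw [hlen]; exact hkm))
    have hpfalse : ∀ j, j < k →
        (fun (i : Nat) => PySem.List.pyGet? e (-1 - (i : Int)) != some (n - 1 - (i : Int))) j
          = false := by
      intro j hj
      rw [Bool.eq_false_iff]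
      intro hc
      exact absurd (matchLen_get e.reverse n j hj) ((hpred j (by omega)).mp hc)
    have hfind : (List.range e.length).find?
        (fun (i : Nat) => PySem.List.pyGet? e (-1 - (i : Int)) != some (n - 1 - (i : Int)))
          = some k := by
      rw [List.range_eq_range']
      have := find_range'_eq e.length 0 k
        (fun (i : Nat) => PySem.List.pyGet? e (-1 - (i : Int)) != some (n - 1 - (i : Int)))
        hkm (fun j hj => by simpa using hpfalse j hj) (by simpa using hptrue)
      simpa using this
    have hfp : findPos e n = pos := by
      unfold findPos
      rw [hfind]
    -- A side
    have hposlt : pos < e.length := by omega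
    have hA : next_element e n
        = some (e.take pos ++ ((e.getD pos 0 + 1) :: ramp (e.getD pos 0 + 1 + 1) k)) := by
      simp only [next_element, hlast, Bool.false_eq_true, if_false, hfp]
      have hff := fold_fill k (e.set pos (e.getD pos 0 + 1)) (pos + 1) (by omega)
        (by simp; omega)
      rw [show e.length - (pos + 1) = k by omega, hff,
        show pos + 1 - 1 = pos from rfl,
        getD_set_self e pos _ hposlt, take_set_succ e pos _ hposlt]
      simp
    -- B side
    rw [if_neg (by rw [hlen]; exact hk)] at hsp
    have hdropeq : (e.reverse.drop (k + 1)).reverse = e.take pos := by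
      rw [List.drop_reverse, List.reverse_reverse]
      congr 1
      omega
    have hgd : e.reverse.getD k 0 = e.getD pos 0 := by
      rw [List.getD_eq_getElem _ _ (by rw [hlen]; omega), List.getElem_reverse,
        List.getD_eq_getElem _ _ hposlt]
    have hB : next_element_alt e n
        = some (e.take pos ++ ramp (e.getD pos 0 + 1) (k + 1)) := by
      simp only [next_element_alt, hsp]
      rw [List.reverse_append, List.reverse_reverse, hdropeq, hgd]
    rw [hA, hB]
    simp [ramp]
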